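-- pv_equiv track=rewrite | github.com/iskandarsulaili/openkore-ai | openkore-ai/ai-service/src/combat/positioning_engine.py | _check_corner
-- ===== SOURCE A (Python) =====
-- from typing import List, Tuple, Dict, Any, Optional
--
-- def _check_corner(
--
--     pos: Tuple[int, int],
--     walls: set
-- ) -> bool:
--     """Check if position is a corner (L-shaped wall pattern)"""
--     # Check all 4 corner patterns
--     corner_patterns = [
--         [(0, -1), (-1, 0)],   # Top-left
--         [(0, -1), (1, 0)],    # Top-right
--         [(0, 1), (-1, 0)],    # Bottom-left
--         [(0, 1), (1, 0)]      # Bottom-right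
--     ]
--
--     for pattern in corner_patterns:
--         if all((pos[0] + dx, pos[1] + dy) in walls for dx, dy in pattern):
--             return True
--
--     return False
-- ===== SOURCE B (Python) =====
-- def _check_corner(pos, walls):
--     """Check if position is a corner (L-shaped wall pattern)."""
--     vertical = (pos[0], pos[1] - 1) in walls or (pos[0], pos[1] + 1) in walls
--     horizontal = (pos[0] - 1, pos[1]) in walls or (pos[0] + 1, pos[1]) in walls
--     return vertical and horizontal
-- ===== Notes on version B (the rewrite author's own statement) =====
-- stated objective: simpler
-- what changed: Replaced the loop over four explicit L-corner patterns by the algebraic factoring into one conjunction of two disjunctions: a vertical wall neighbour AND a horizontal wall neighbour.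
import Mathlib
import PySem

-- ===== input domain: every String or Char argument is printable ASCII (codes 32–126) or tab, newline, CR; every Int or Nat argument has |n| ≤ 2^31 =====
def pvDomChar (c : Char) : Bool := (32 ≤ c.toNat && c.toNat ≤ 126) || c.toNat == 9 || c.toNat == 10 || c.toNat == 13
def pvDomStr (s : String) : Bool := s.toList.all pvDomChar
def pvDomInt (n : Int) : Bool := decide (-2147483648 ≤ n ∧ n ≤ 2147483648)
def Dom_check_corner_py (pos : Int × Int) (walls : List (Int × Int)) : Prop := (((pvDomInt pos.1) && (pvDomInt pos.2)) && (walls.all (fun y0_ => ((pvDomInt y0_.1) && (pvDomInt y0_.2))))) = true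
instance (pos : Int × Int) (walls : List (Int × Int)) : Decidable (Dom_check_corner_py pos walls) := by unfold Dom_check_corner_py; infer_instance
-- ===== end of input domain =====

-- B replaces the four-pattern loop by the factored boolean test (vertical ∧ horizontal) — simpler.
-- ===== PORT A =====
-- loop over the four L-shaped corner patterns; `any` models the early return
def check_corner_py (pos : Int × Int) (walls : List (Int × Int)) : Bool :=
  let corner_patterns : List (List (Int × Int)) :=
    [[(0, -1), (-1, 0)], [(0, -1), (1, 0)], [(0, 1), (-1, 0)], [(0, 1), (1, 0)]]
  corner_patterns.any (fun pattern =>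
    pattern.all (fun d => walls.contains (pos.1 + d.1, pos.2 + d.2)))

-- ===== PORT B =====
-- B: a vertical wall neighbour AND a horizontal wall neighbour
def check_corner_py_alt (pos : Int × Int) (walls : List (Int × Int)) : Bool :=
  let vertical := walls.contains (pos.1, pos.2 - 1) || walls.contains (pos.1, pos.2 + 1)
  let horizontal := walls.contains (pos.1 - 1, pos.2) || walls.contains (pos.1 + 1, pos.2)
  vertical && horizontal

-- ===== PRECONDITION & SPEC =====
def Spec_check_corner_py (pos : Int × Int) (walls : List (Int × Int)) (out : Bool) : Prop := out = check_corner_py_alt pos walls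
instance (pos : Int × Int) (walls : List (Int × Int)) (out : Bool) : Decidable (Spec_check_corner_py pos walls out) := by unfold Spec_check_corner_py; infer_instance

-- ===== CLAIM (what is proved, stated in full; the proofs are below) =====
def Claim_equal_check_corner_py : Prop := ∀ (pos : Int × Int) (walls : List (Int × Int)), Dom_check_corner_py pos walls → Spec_check_corner_py pos walls (check_corner_py pos walls)

-- ===== LEMMAS AND PROOFS =====

-- ===== VERDICT (by name: the statement is the Claim_ definition above) =====
theorem check_corner_py_spec : Claim_equal_check_corner_py := by
  intro pos walls _
  unfold Spec_check_corner_py check_corner_py check_corner_py_alt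
  simp only [List.any_cons, List.any_nil, List.all_cons, List.all_nil, List.contains_eq_mem,
    Int.add_neg_eq_sub, Bool.or_false, Int.add_zero, Int.zero_add]
  cases h1 : decide ((pos.1, pos.2 - 1) ∈ walls) <;>
    cases h2 : decide ((pos.1, pos.2 + 1) ∈ walls) <;>
      cases h3 : decide ((pos.1 - 1, pos.2) ∈ walls) <;>
        cases h4 : decide ((pos.1 + 1, pos.2) ∈ walls) <;> simp_all
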